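-- pv_equiv track=rewrite | github.com/youkangjin/programmers | 프로그래머스/unrated/120843. 공 던지기/공 던지기.py | solution
-- ===== SOURCE A (Python) =====
-- def solution(numbers, k):
--     answer = 0
--     i=0
--     a=[]
--     answer1=0
--     while(i<k):
--         if len(numbers)%2==0:
--             for j in range(0,len(numbers),2):
--                 if answer==k:
--                     break
--                 answer+=1
--                 answer1=numbers[j]
--             i+=1
--         elif len(numbers)%2==1:
--             if i==0:
--                 for t in range(2):
--                     for j in numbers:
--                         a.append(j)
--             for v in range(0,len(a),2):
--                 if answer==k:
--                     break
--                 answer+=1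
--                 answer1=a[v]
--             i+=1
--     return answer1
-- ===== SOURCE B (Python) =====
-- def solution(numbers, k):
--     # k-th recipient when the ball skips one person each throw, circularly:
--     # closed-form index instead of simulating the k throws.
--     return numbers[2 * (k - 1) % len(numbers)]
-- ===== Notes on version B (the rewrite author's own statement) =====
-- stated objective: faster
-- what changed: Replaces A's O(k) pass-by-pass simulation (with an explicitly doubled copy of the list for odd lengths) by the closed-form index numbers[2*(k-1) % len(numbers)].
-- outside the precondition, e.g. on solution([], 3): A returns 0, B raises ZeroDivisionError; on solution([1, 2], 0): A returns 0, B returns 1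
import Mathlib
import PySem

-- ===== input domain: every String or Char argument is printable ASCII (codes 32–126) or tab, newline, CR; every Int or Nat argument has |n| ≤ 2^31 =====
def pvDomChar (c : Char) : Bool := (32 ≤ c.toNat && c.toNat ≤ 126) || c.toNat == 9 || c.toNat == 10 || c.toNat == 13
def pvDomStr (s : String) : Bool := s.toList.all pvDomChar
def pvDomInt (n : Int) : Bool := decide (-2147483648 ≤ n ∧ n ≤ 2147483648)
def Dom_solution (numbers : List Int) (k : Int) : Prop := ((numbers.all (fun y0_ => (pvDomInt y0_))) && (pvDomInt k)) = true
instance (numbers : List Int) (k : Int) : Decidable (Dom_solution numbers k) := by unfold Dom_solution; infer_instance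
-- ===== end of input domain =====

-- B replaces A's pass-by-pass simulation of the k throws by the closed-form index 2*(k-1) % len(numbers).

-- ===== PORT A =====
-- inner 'for j in range(...): if answer==k: break; answer+=1; answer1=xs[j]'
def pvForStep (xs : List Int) (k : Int) : List Int → Int × Int → Int × Int
  | [], st => st
  | j :: js, (answer, answer1) =>
      if answer = k then (answer, answer1)
      else pvForStep xs k js (answer + 1, PySem.List.pyGetD xs j 0)

-- 'while i < k' loop; fuel = (k - i).toNat since i increases by 1 every iteration
-- (len(numbers) % 2 is 0 or 1, so Python's if/elif is an exact two-way split).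
def pvWhile (numbers : List Int) (k : Int) : Nat → Int → Int → Int → List Int → Int
  | 0, _i, _answer, answer1, _a => answer1
  | fuel + 1, i, answer, answer1, a =>
      if i < k then
        if (numbers.length : Int) % 2 = 0 then
          let st := pvForStep numbers k (PySem.List.pyRange 0 (numbers.length : Int) 2) (answer, answer1)
          pvWhile numbers k fuel (i + 1) st.1 st.2 a
        else
          let a' := if i = 0 then a ++ numbers ++ numbers else a
          let st := pvForStep a' k (PySem.List.pyRange 0 (a'.length : Int) 2) (answer, answer1)
          pvWhile numbers k fuel (i + 1) st.1 st.2 a'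
      else answer1

def solution (numbers : List Int) (k : Int) : Int :=
  pvWhile numbers k k.toNat 0 0 0 []

-- ===== PORT B =====
def solution_alt (numbers : List Int) (k : Int) : Int :=
  PySem.List.pyGetD numbers ((2 * (k - 1)) % (numbers.length : Int)) 0

-- ===== PRECONDITION & SPEC =====
-- Pre_ excludes the empty list (B's '% len' raises ZeroDivisionError where A returns its
-- initial 0) and k ≤ 0, outside the task's natural domain, where A's while-loop never runs
-- and it returns the leftover initial 0.
def Pre_solution (numbers : List Int) (k : Int) : Prop := numbers ≠ [] ∧ 1 ≤ k
instance (numbers : List Int) (k : Int) : Decidable (Pre_solution numbers k) := by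
  unfold Pre_solution; infer_instance
def pvWitness_solution : List Int × Int := ([10, 20, 30], 5)

def Spec_solution (numbers : List Int) (k : Int) (out : Int) : Prop := out = solution_alt numbers k
instance (numbers : List Int) (k : Int) (out : Int) : Decidable (Spec_solution numbers k out) := by unfold Spec_solution; infer_instance

-- ===== CLAIM (what is proved, stated in full; the proofs are below) =====
def Claim_equal_solution : Prop := ∀ (numbers : List Int) (k : Int), Dom_solution numbers k → Pre_solution numbers k → Spec_solution numbers k (solution numbers k)

-- ===== LEMMAS AND PROOFS =====

-- the inner for-loop is a no-op once answer = k
theorem pvForStep_stop (xs : List Int) (k : Int) (idxs : List Int) (a1 : Int) :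
    pvForStep xs k idxs (k, a1) = (k, a1) := by
  cases idxs <;> simp [pvForStep]

-- if the pass cannot reach k, it just adds the index count to answer
theorem pvForStep_all (xs : List Int) (k : Int) (idxs : List Int) (ans a1 : Int)
    (h : ans + idxs.length < k) :
    (pvForStep xs k idxs (ans, a1)).1 = ans + idxs.length := by
  induction idxs generalizing ans a1 with
  | nil => simp [pvForStep]
  | cons j js ih =>
      have hne : ¬ ans = k := by simp at h; omega
      simp only [pvForStep, hne, if_false]
      have := ih (ans + 1) (PySem.List.pyGetD xs j 0) (by simp at h ⊢; omega)
      simp at this ⊢; omega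

-- if the pass reaches k, it stops at k with answer1 = xs[idxs[k - ans - 1]]
theorem pvForStep_hit (xs : List Int) (k : Int) (idxs : List Int) (ans a1 : Int)
    (h1 : ans < k) (h2 : k ≤ ans + idxs.length) :
    pvForStep xs k idxs (ans, a1)
      = (k, PySem.List.pyGetD xs (idxs.getD (k - ans - 1).toNat 0) 0) := by
  induction idxs generalizing ans a1 with
  | nil => simp at h2; omega
  | cons j js ih =>
      have hne : ¬ ans = k := by omega
      simp only [pvForStep, hne, if_false]
      by_cases hlast : k = ans + 1
      · subst hlast
        rw [pvForStep_stop]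
        have h0 : (ans + 1 - ans - 1).toNat = 0 := by omega
        rw [h0, List.getD_cons_zero]
      · have := ih (ans + 1) (PySem.List.pyGetD xs j 0) (by omega) (by simp at h2 ⊢; omega)
        rw [this]
        have hsucc : (k - ans - 1).toNat = (k - (ans + 1) - 1).toNat + 1 := by omega
        rw [hsucc, List.getD_cons_succ]

-- range(0, 2*m, 2) is [0, 2, ..., 2*(m-1)]
theorem pvRange_two (m : Int) (hm : 0 ≤ m) :
    PySem.List.pyRange 0 (2 * m) 2
      = List.map (fun p : Nat => (0 : Int) + 2 * (p : Int)) (List.range m.toNat) := by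
  rw [PySem.List.pyRange_of_pos 0 (2 * m) (by norm_num)]
  have harg : (if (0 : Int) < 2 * m then ((2 * m - 0 + 2 - 1) / 2).toNat else 0) = m.toNat := by
    split <;> omega
  rw [harg]

theorem pvRange_two_length (m : Int) (hm : 0 ≤ m) :
    ((PySem.List.pyRange 0 (2 * m) 2).length : Int) = m := by
  rw [pvRange_two m hm]; simp; omega

theorem pvRange_two_getD (m : Int) (hm : 0 ≤ m) (p : Nat) (hp : p < m.toNat) :
    (PySem.List.pyRange 0 (2 * m) 2).getD p 0 = 2 * p := by
  rw [pvRange_two m hm, PySem.List.getD_map_range _ _ _ _ hp]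
  ring

-- indexing the doubled list = indexing the list modulo its length
theorem pvGet_double (xs : List Int) (q : Int) (h0 : 0 ≤ q) (h2 : q < 2 * (xs.length : Int)) :
    PySem.List.pyGetD (xs ++ xs) q 0 = PySem.List.pyGetD xs (q % (xs.length : Int)) 0 := by
  have hlen : 0 < xs.length := by omega
  by_cases hlt : q < (xs.length : Int)
  · rw [Int.emod_eq_of_lt h0 hlt]
    rw [PySem.List.pyGetD_eq_getElem _ _ h0 (by simp; omega),
        PySem.List.pyGetD_eq_getElem _ _ h0 hlt]
    rw [List.getElem_append]
    have ht : q.toNat < xs.length := by omega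
    simp [ht]
  · have hmod : q % (xs.length : Int) = q - (xs.length : Int) := by
      rw [← Int.sub_emod_right q (xs.length : Int)]
      exact Int.emod_eq_of_lt (by omega) (by omega)
    rw [hmod]
    rw [PySem.List.pyGetD_eq_getElem _ _ h0 (by simp; omega),
        PySem.List.pyGetD_eq_getElem _ _ (by omega) (by omega)]
    rw [List.getElem_append]
    have ht : ¬ q.toNat < xs.length := by omega
    simp only [ht, dif_neg, not_false_iff]
    congr 1
    omega

-- the target value both invariant lemmas converge to
def pvTgt (numbers : List Int) (k : Int) : Int :=
  PySem.List.pyGetD numbers ((2 * (k - 1)) % (numbers.length : Int)) 0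

-- while-loop invariant, even length
theorem pvWhile_even (numbers : List Int) (k : Int) (hk : 1 ≤ k)
    (hne : numbers ≠ []) (hev : (numbers.length : Int) % 2 = 0) :
    ∀ (fuel : Nat) (i answer answer1 : Int) (a : List Int),
      i + fuel = k → 0 ≤ i →
      answer = min k (i * ((numbers.length : Int) / 2)) →
      (answer = k → answer1 = pvTgt numbers k) →
      pvWhile numbers k fuel i answer answer1 a = pvTgt numbers k := by
  have hlen0 : 0 < numbers.length := by cases numbers <;> simp_all
  have hm1 : 1 ≤ (numbers.length : Int) / 2 := by omega
  have hn : (numbers.length : Int) = 2 * ((numbers.length : Int) / 2) := by omega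
  have hlen : ((PySem.List.pyRange 0 (numbers.length : Int) 2).length : Int)
      = (numbers.length : Int) / 2 := by
    conv_lhs => rw [hn]
    exact pvRange_two_length _ (by omega)
  intro fuel
  induction fuel with
  | zero =>
      intro i answer answer1 a hfuel hi hans himp
      have hik : i = k := by omega
      have hkm : k ≤ k * ((numbers.length : Int) / 2) :=
        le_mul_of_one_le_right (by omega) hm1
      have hak : answer = k := by rw [hik] at hans; omega
      simp only [pvWhile]
      exact himp hak
  | succ fuel ih =>
      intro i answer answer1 a hfuel hi hans himp
      have hik : i < k := by omega
      have hpm : (i + 1) * ((numbers.length : Int) / 2)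
          = i * ((numbers.length : Int) / 2) + ((numbers.length : Int) / 2) := by ring
      simp only [pvWhile, if_pos hik, if_pos hev]
      by_cases hak : answer = k
      · rw [hak, pvForStep_stop]
        exact ih (i + 1) k answer1 a (by omega) (by omega) (by omega) (fun _ => himp hak)
      · by_cases hhit : k ≤ answer + ((numbers.length : Int) / 2)
        · rw [pvForStep_hit numbers k _ answer answer1 (by omega) (by omega)]
          have hgd : (PySem.List.pyRange 0 (numbers.length : Int) 2).getD
                (k - answer - 1).toNat 0 = 2 * ((k - answer - 1).toNat : Int) := by
            conv_lhs => rw [hn]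
            exact pvRange_two_getD _ (by omega) _ (by omega)
          rw [hgd]
          have h2p : (numbers.length : Int) * i
              = 2 * (i * ((numbers.length : Int) / 2)) := by
            conv_lhs => rw [hn]
            ring
          have hval : PySem.List.pyGetD numbers (2 * ((k - answer - 1).toNat : Int)) 0
              = pvTgt numbers k := by
            unfold pvTgt
            congr 1
            rw [show 2 * (k - 1)
                  = 2 * ((k - answer - 1).toNat : Int) + (numbers.length : Int) * i by omega,
                Int.add_mul_emod_self_left]
            exact (Int.emod_eq_of_lt (by omega) (by omega)).symm
          rw [hval]
          exact ih (i + 1) k (pvTgt numbers k) a (by omega) (by omega) (by omega) (fun _ => rfl)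
        · have h1 := pvForStep_all numbers k
            (PySem.List.pyRange 0 (numbers.length : Int) 2) answer answer1 (by omega)
          rcases hst : pvForStep numbers k
              (PySem.List.pyRange 0 (numbers.length : Int) 2) (answer, answer1)
            with ⟨ansN, a1N⟩
          rw [hst] at h1
          simp only at h1
          exact ih (i + 1) ansN a1N a (by omega) (by omega) (by omega)
            (fun hEq => absurd hEq (by omega))

-- while-loop invariant, odd length
theorem pvWhile_odd (numbers : List Int) (k : Int) (hk : 1 ≤ k)
    (hne : numbers ≠ []) (hodd : (numbers.length : Int) % 2 = 1) :
    ∀ (fuel : Nat) (i answer answer1 : Int) (a : List Int),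
      i + fuel = k → 0 ≤ i →
      (i = 0 → a = []) → (¬ i = 0 → a = numbers ++ numbers) →
      answer = min k (i * (numbers.length : Int)) →
      (answer = k → answer1 = pvTgt numbers k) →
      pvWhile numbers k fuel i answer answer1 a = pvTgt numbers k := by
  have hlen0 : 0 < numbers.length := by cases numbers <;> simp_all
  have hnodd : ¬ (numbers.length : Int) % 2 = 0 := by omega
  have hdl : (((numbers ++ numbers).length : Nat) : Int) = 2 * (numbers.length : Int) := by
    simp; omega
  have hlen : ((PySem.List.pyRange 0 (((numbers ++ numbers).length : Nat) : Int) 2).length : Int)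
      = (numbers.length : Int) := by
    rw [hdl]; exact pvRange_two_length _ (by omega)
  intro fuel
  induction fuel with
  | zero =>
      intro i answer answer1 a hfuel hi _ _ hans himp
      have hik : i = k := by omega
      have hkm : k ≤ k * (numbers.length : Int) :=
        le_mul_of_one_le_right (by omega) (by omega)
      have hak : answer = k := by rw [hik] at hans; omega
      simp only [pvWhile]
      exact himp hak
  | succ fuel ih =>
      intro i answer answer1 a hfuel hi ha0 ha1 hans himp
      have hik : i < k := by omega
      have hpm : (i + 1) * (numbers.length : Int)
          = i * (numbers.length : Int) + (numbers.length : Int) := by ring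
      simp only [pvWhile, if_pos hik, if_neg hnodd]
      have haeq : (if i = 0 then a ++ numbers ++ numbers else a) = numbers ++ numbers := by
        by_cases h0 : i = 0
        · rw [if_pos h0, ha0 h0]; simp
        · rw [if_neg h0, ha1 h0]
      rw [haeq]
      by_cases hak : answer = k
      · rw [hak, pvForStep_stop]
        exact ih (i + 1) k answer1 (numbers ++ numbers) (by omega) (by omega) (by omega)
          (fun _ => rfl) (by omega) (fun _ => himp hak)
      · by_cases hhit : k ≤ answer + (numbers.length : Int)
        · rw [pvForStep_hit (numbers ++ numbers) k _ answer answer1 (by omega) (by omega)]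
          have hgd : (PySem.List.pyRange 0 (((numbers ++ numbers).length : Nat) : Int) 2).getD
                (k - answer - 1).toNat 0 = 2 * ((k - answer - 1).toNat : Int) := by
            rw [hdl]; exact pvRange_two_getD _ (by omega) _ (by omega)
          rw [hgd]
          have h2p : (numbers.length : Int) * (2 * i)
              = 2 * (i * (numbers.length : Int)) := by ring
          have hval : PySem.List.pyGetD (numbers ++ numbers)
                (2 * ((k - answer - 1).toNat : Int)) 0 = pvTgt numbers k := by
            rw [pvGet_double numbers _ (by omega) (by omega)]
            unfold pvTgt
            congr 1
            rw [show 2 * (k - 1)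
                  = 2 * ((k - answer - 1).toNat : Int)
                    + (numbers.length : Int) * (2 * i) by omega,
                Int.add_mul_emod_self_left]
          rw [hval]
          exact ih (i + 1) k (pvTgt numbers k) (numbers ++ numbers) (by omega) (by omega)
            (by omega) (fun _ => rfl) (by omega) (fun _ => rfl)
        · have h1 := pvForStep_all (numbers ++ numbers) k
            (PySem.List.pyRange 0 (((numbers ++ numbers).length : Nat) : Int) 2) answer answer1
            (by omega)
          rcases hst : pvForStep (numbers ++ numbers) k
              (PySem.List.pyRange 0 (((numbers ++ numbers).length : Nat) : Int) 2)
              (answer, answer1) with ⟨ansN, a1N⟩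
          rw [hst] at h1
          simp only at h1
          exact ih (i + 1) ansN a1N (numbers ++ numbers) (by omega) (by omega) (by omega)
            (fun _ => rfl) (by omega) (fun hEq => absurd hEq (by omega))

-- ===== VERDICT (by name: the statement is the Claim_ definition above) =====
theorem solution_spec : Claim_equal_solution := by
  intro numbers k _ hpre
  obtain ⟨hne, hk⟩ := hpre
  unfold Spec_solution solution
  have hfuel : (0 : Int) + (k.toNat : Int) = k := by omega
  have htgt : solution_alt numbers k = pvTgt numbers k := rfl
  rw [htgt]
  rcases Int.emod_two_eq (numbers.length : Int) with hev | hodd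
  · exact pvWhile_even numbers k hk hne hev k.toNat 0 0 0 [] hfuel (by omega)
      (by omega) (fun h => absurd h (by omega))
  · exact pvWhile_odd numbers k hk hne hodd k.toNat 0 0 0 [] hfuel (by omega)
      (fun _ => rfl) (fun h => absurd rfl h) (by omega) (fun h => absurd h (by omega))
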